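-- pv_equiv track=rewrite | github.com/DAVIDCRUZ18/programas | copiareto5.py | preciomayor
-- ===== SOURCE A (Python) =====
-- def preciomayor(tablaentrada):
--     claves=list(tablaentrada.keys())
--     mayor_precio=tablaentrada[claves[0]][1]
--     nombre_mayor=tablaentrada[claves[0]][0]
--     for n in tablaentrada:
--         if tablaentrada[n][1]>mayor_precio:
--             mayor_precio=tablaentrada[n][1]
--             nombre_mayor=tablaentrada[n][0]
--     return nombre_mayor
-- ===== SOURCE B (Python) =====
-- def preciomayor(tablaentrada):
--     return sorted(tablaentrada.values(), key=lambda v: v[1], reverse=True)[0][0]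
-- ===== Notes on version B (the rewrite author's own statement) =====
-- stated objective: alternative
-- what changed: Replaces the explicit running-max loop over dict keys with a stable descending sort of the values by price, returning the name of the first element; stability preserves A's strict-'>' tie behaviour (earliest item at the maximum price wins).
import Mathlib
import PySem

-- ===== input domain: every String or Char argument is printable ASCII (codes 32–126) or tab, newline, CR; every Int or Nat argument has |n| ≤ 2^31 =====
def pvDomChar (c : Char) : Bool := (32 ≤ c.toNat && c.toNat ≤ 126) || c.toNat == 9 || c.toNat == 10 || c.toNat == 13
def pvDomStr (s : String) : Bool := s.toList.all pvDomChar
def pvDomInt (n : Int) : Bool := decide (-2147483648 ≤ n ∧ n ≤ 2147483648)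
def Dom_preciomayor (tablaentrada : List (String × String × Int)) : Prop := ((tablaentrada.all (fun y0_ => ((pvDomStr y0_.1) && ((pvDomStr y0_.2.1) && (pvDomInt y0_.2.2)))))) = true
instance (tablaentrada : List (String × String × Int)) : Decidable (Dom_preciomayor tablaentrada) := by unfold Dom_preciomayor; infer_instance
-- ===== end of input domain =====

-- B replaces the running-max loop by a stable descending sort of the values by price, taking the first element's name (alternative decomposition, same result).

-- ===== PORT A =====
def preciomayor (tablaentrada : List (String × String × Int)) : String :=
  let d : PySem.Dict String (String × Int) := PySem.Dict.mk tablaentrada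
  let claves := PySem.Dict.keys d
  match PySem.List.pyGet? claves 0 with
  | none => ""          -- IndexError on the empty dict: excluded by Pre_
  | some k0 =>
    match PySem.Dict.get? d k0 with
    | none => ""        -- unreachable: k0 is a key of d
    | some v0 =>
      let s := claves.foldl
        (fun (acc : Int × String) n =>
          match PySem.Dict.get? d n with
          | none => acc -- unreachable: n iterates over d's keys
          | some v => if v.2 > acc.1 then (v.2, v.1) else acc)
        (v0.2, v0.1)
      s.2

-- ===== PORT B =====
def preciomayor_alt (tablaentrada : List (String × String × Int)) : String :=
  let vals := PySem.Dict.values (PySem.Dict.mk tablaentrada)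
  match PySem.List.pyGet? (PySem.List.sorted vals (fun v => v.2) true) 0 with
  | none => ""          -- IndexError on the empty dict: excluded by Pre_
  | some v => v.1

-- ===== PRECONDITION & SPEC =====
-- Pre_ excludes the empty list (Python A raises IndexError on an empty dict) and lists whose
-- keys repeat (such a list does not represent any Python dict, A's input type).
def Pre_preciomayor (tablaentrada : List (String × String × Int)) : Prop :=
  tablaentrada ≠ [] ∧ (tablaentrada.map Prod.fst).Nodup
instance (tablaentrada : List (String × String × Int)) : Decidable (Pre_preciomayor tablaentrada) := by
  unfold Pre_preciomayor; infer_instance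
def pvWitness_preciomayor : (List (String × String × Int)) := [("a", "pan", 3), ("b", "sal", 3)]
def Spec_preciomayor (tablaentrada : List (String × String × Int)) (out : String) : Prop := out = preciomayor_alt tablaentrada
instance (tablaentrada : List (String × String × Int)) (out : String) : Decidable (Spec_preciomayor tablaentrada out) := by unfold Spec_preciomayor; infer_instance

-- ===== CLAIM (what is proved, stated in full; the proofs are below) =====
def Claim_equal_preciomayor : Prop := ∀ (tablaentrada : List (String × String × Int)), Dom_preciomayor tablaentrada → Pre_preciomayor tablaentrada → Spec_preciomayor tablaentrada (preciomayor tablaentrada)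

-- ===== LEMMAS AND PROOFS =====

-- first element with strictly greater price wins; the spec both sides reduce to
def fm (b : String × Int) (l : List (String × Int)) : String × Int :=
  l.foldl (fun acc v => if acc.2 < v.2 then v else acc) b

-- A's fold over the keys, with nodup-key lookups, is a fold over the values
theorem foldl_keys_eq_values (d : PySem.Dict String (String × Int))
    (u : List (String × String × Int)) (a : Int × String)
    (h : ∀ p ∈ u, PySem.Dict.get? d p.1 = some p.2) :
    List.foldl
      (fun (acc : Int × String) n =>
        match PySem.Dict.get? d n with
        | none => acc
        | some v => if v.2 > acc.1 then (v.2, v.1) else acc)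
      a (u.map Prod.fst)
    = List.foldl (fun (acc : Int × String) v => if v.2 > acc.1 then (v.2, v.1) else acc)
        a (u.map (fun p => p.2)) := by
  induction u generalizing a with
  | nil => rfl
  | cons p rest ih =>
      simp only [List.map_cons, List.foldl_cons, h p (List.mem_cons_self)]
      exact ih _ (fun q hq => h q (List.mem_cons_of_mem _ hq))

-- the (price, name)-accumulator fold is fm with the pair flipped
theorem foldl_flip_eq_fm (l : List (String × Int)) (b : String × Int) :
    List.foldl (fun (acc : Int × String) v => if v.2 > acc.1 then (v.2, v.1) else acc)
      (b.2, b.1) l = ((fm b l).2, (fm b l).1) := by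
  induction l generalizing b with
  | nil => rfl
  | cons x t ih =>
      simp only [List.foldl_cons, fm] at *
      by_cases h : b.2 < x.2
      · rw [if_pos (show x.2 > b.2 from h), if_pos h]; exact ih x
      · rw [if_neg (show ¬ x.2 > b.2 from h), if_neg h]; exact ih b

-- inserting into a nonempty list: the head becomes x exactly when `before x head`
theorem insertBy_cons_shape (before : (String × Int) → (String × Int) → Bool)
    (x b : String × Int) (t : List (String × Int)) :
    ∃ t', PySem.List.insertBy before x (b :: t) = (if before x b then x else b) :: t' := by
  by_cases h : before x b = true
  · exact ⟨b :: t, by simp [PySem.List.insertBy, h]⟩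
  · exact ⟨PySem.List.insertBy before x t, by simp [PySem.List.insertBy, h]⟩

-- head of the insertion-sort fold (reverse order, key = price) is fm
theorem foldl_insertBy_head (l : List (String × Int)) (b : String × Int)
    (t : List (String × Int)) :
    ∃ t', List.foldl
        (fun acc x => PySem.List.insertBy (fun a c => decide (c.2 < a.2)) x acc) (b :: t) l
      = fm b l :: t' := by
  induction l generalizing b t with
  | nil => exact ⟨t, by simp [fm]⟩
  | cons x r ih =>
      obtain ⟨t1, ht1⟩ := insertBy_cons_shape (fun a c => decide (c.2 < a.2)) x b t
      simp only [List.foldl_cons, ht1]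
      obtain ⟨t', ht'⟩ := ih (if decide (b.2 < x.2) = true then x else b) t1
      refine ⟨t', ?_⟩
      rw [ht']
      congr 1
      simp only [fm, List.foldl_cons]
      by_cases h : b.2 < x.2 <;> simp [h]

-- ===== VERDICT (by name: the statement is the Claim_ definition above) =====
theorem preciomayor_spec : Claim_equal_preciomayor := by
  intro t _hdom hpre
  obtain ⟨hne, hnd⟩ := hpre
  obtain ⟨p, rest, rfl⟩ := List.exists_cons_of_ne_nil hne
  unfold Spec_preciomayor preciomayor preciomayor_alt
  have hkeys : PySem.Dict.keys (PySem.Dict.mk (p :: rest)) = p.1 :: rest.map Prod.fst := by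
    simp [PySem.Dict.keys]
  have hget0 : PySem.Dict.get? (PySem.Dict.mk (p :: rest)) p.1 = some p.2 := by
    simp [PySem.Dict.get?, List.find?]
  have hnd' : (PySem.Dict.keys (PySem.Dict.mk (p :: rest))).Nodup := by
    simpa [PySem.Dict.keys] using hnd
  have hall : ∀ q ∈ (p :: rest), PySem.Dict.get? (PySem.Dict.mk (p :: rest)) q.1 = some q.2 := by
    intro q hq
    exact PySem.Dict.get?_of_mem_items _ (by simpa using hq) hnd'
  -- A side
  simp only [hkeys]
  have h0 : PySem.List.pyGet? (p.1 :: rest.map Prod.fst) 0 = some p.1 := by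
    simp [PySem.List.pyGet?, PySem.List.pyIdx?]
  simp only [h0, hget0]
  have hA := foldl_keys_eq_values (PySem.Dict.mk (p :: rest)) (p :: rest) (p.2.2, p.2.1) hall
  simp only [List.map_cons] at hA
  rw [hA]
  rw [List.foldl_cons, if_neg (lt_irrefl p.2.2)]
  have hA2 := foldl_flip_eq_fm (rest.map (fun q => q.2)) p.2
  rw [hA2]
  -- B side
  have hvals : PySem.Dict.values (PySem.Dict.mk (p :: rest)) = p.2 :: rest.map (fun q => q.2) := by
    simp [PySem.Dict.values]
  rw [hvals, PySem.List.sorted_rev_eq_foldl_insertBy]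
  simp only [List.foldl_cons]
  have h1 : PySem.List.insertBy (fun a c => decide (c.2 < a.2)) p.2 ([] : List (String × Int)) = [p.2] := by
    simp [PySem.List.insertBy]
  rw [h1]
  obtain ⟨t', ht'⟩ := foldl_insertBy_head (rest.map (fun q => q.2)) p.2 []
  rw [ht']
  simp [PySem.List.pyGet?, PySem.List.pyIdx?]
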